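-- pv_equiv track=rewrite | github.com/stirfrypapi/coding_challenges | template.py | commonality
-- ===== SOURCE A (Python) =====
-- def commonality(s):
--     hashRight = {}
--     commonality = 0
--     hashC = {}
--     for char in s:
--         if char not in hashRight:
--             hashRight[char] = 1
--         else:
--             hashRight[char] += 1
--     for char in s:
--         if char not in hashC:
--             hashC[char] = 0
--     hashLeft = {}
--     for c in s:
--         if c not in hashLeft:
--             hashLeft[c] = 1
--         else:
--             hashLeft[c] += 1
--         hashRight[c] -= 1
--         if hashRight[c] < 0:
--             hashRight[c] = 0
--         commonality += min(hashRight[c], hashLeft[c])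
--     return commonality
-- ===== SOURCE B (Python) =====
-- def commonality(s):
--     counts = {}
--     for c in s:
--         counts[c] = counts.get(c, 0) + 1
--     return sum(m * m // 4 for m in counts.values())
-- ===== Notes on version B (the rewrite author's own statement) =====
-- stated objective: simpler
-- what changed: Replaced the three dict passes with running left/right counts by a single frequency count followed by the closed form sum of m*m//4 over the character counts (each character with total count m contributes sum_{j=1..m} min(j, m-j) = m*m//4); one dict pass plus a loop over distinct characters instead of three passes over s.
import Mathlib
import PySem

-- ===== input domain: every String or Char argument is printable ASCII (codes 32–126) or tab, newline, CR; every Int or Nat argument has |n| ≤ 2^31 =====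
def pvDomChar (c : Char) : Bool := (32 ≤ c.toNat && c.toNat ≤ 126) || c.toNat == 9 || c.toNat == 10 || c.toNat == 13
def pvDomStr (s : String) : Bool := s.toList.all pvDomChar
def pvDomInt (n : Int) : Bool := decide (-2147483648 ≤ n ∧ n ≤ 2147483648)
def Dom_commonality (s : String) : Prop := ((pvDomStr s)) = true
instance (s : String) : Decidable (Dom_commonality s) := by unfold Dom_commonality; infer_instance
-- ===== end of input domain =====

-- B replaces A's three dict passes with running left/right counts by one frequency count
-- plus the closed form sum of m*m//4 over the counts (objective: simpler).

-- ===== PORT A =====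
def commonality (s : String) : Int :=
  let hashRight : PySem.Dict Char Int := s.toList.foldl
    (fun d char => if d.contains char = false then d.insert char 1 else d.modify char 0 (· + 1))
    PySem.Dict.empty
  -- Python's second loop building hashC (never read afterwards)
  let _hashC : PySem.Dict Char Int := s.toList.foldl
    (fun d char => if d.contains char = false then d.insert char 0 else d) PySem.Dict.empty
  -- third loop: state (hashLeft, hashRight, commonality); hashRight[c] -= 1 is modify with
  -- default 0 — exact here since every c of s is a key of hashRight built by the first loop
  let st := s.toList.foldl
    (fun (st : PySem.Dict Char Int × PySem.Dict Char Int × Int) c =>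
      let hashLeft := if st.1.contains c = false then st.1.insert c 1 else st.1.modify c 0 (· + 1)
      let hR1 := st.2.1.modify c 0 (· - 1)
      let hR2 := if hR1.getD c 0 < 0 then hR1.insert c 0 else hR1
      (hashLeft, hR2, st.2.2 + min (hR2.getD c 0) (hashLeft.getD c 0)))
    (PySem.Dict.empty, hashRight, 0)
  st.2.2

-- ===== PORT B =====
def commonality_alt (s : String) : Int :=
  let counts : PySem.Dict Char Int :=
    s.toList.foldl (fun d c => d.insert c (d.getD c 0 + 1)) PySem.Dict.empty
  counts.values.foldl (fun acc m => acc + PySem.Int.floordiv (m * m) 4) 0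

-- ===== PRECONDITION & SPEC =====
def Spec_commonality (s : String) (out : Int) : Prop := out = commonality_alt s
instance (s : String) (out : Int) : Decidable (Spec_commonality s out) := by unfold Spec_commonality; infer_instance

-- ===== CLAIM (what is proved, stated in full; the proofs are below) =====
def Claim_equal_commonality : Prop := ∀ (s : String), Dom_commonality s → Spec_commonality s (commonality s)

-- ===== LEMMAS AND PROOFS =====

-- partial sums of A's per-occurrence contributions for one character with total count m:
-- pvG a m = sum over the first a occurrences j = 1..a of min(j, m - j)
def pvG (a : Nat) (m : Nat) : Int :=
  match a with
  | 0 => 0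
  | a + 1 => pvG a m + min ((a : Int) + 1) ((m : Int) - ((a : Int) + 1))

-- the body of A's third loop, named so the invariant lemma can speak about it
def pvStepA (st : PySem.Dict Char Int × PySem.Dict Char Int × Int) (c : Char) :
    PySem.Dict Char Int × PySem.Dict Char Int × Int :=
  let hashLeft := if st.1.contains c = false then st.1.insert c 1 else st.1.modify c 0 (· + 1)
  let hR1 := st.2.1.modify c 0 (· - 1)
  let hR2 := if hR1.getD c 0 < 0 then hR1.insert c 0 else hR1
  (hashLeft, hR2, st.2.2 + min (hR2.getD c 0) (hashLeft.getD c 0))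

-- one insert-or-increment step of A, seen through getD
theorem pvStepA_L (L : PySem.Dict Char Int) (c x : Char) :
    (if L.contains c = false then L.insert c 1 else L.modify c 0 (· + 1)).getD x 0
      = if x = c then L.getD c 0 + 1 else L.getD x 0 := by
  by_cases h : L.contains c = false
  · simp [h, PySem.Dict.getD_insert, PySem.Dict.getD_of_not_contains L (0:Int) h]
  · simp [h, PySem.Dict.getD_modify]

-- A's first loop is a counter: getD reads off the count
theorem pvCountFold (l : List Char) : ∀ (d : PySem.Dict Char Int) (x : Char),
    (l.foldl (fun d char => if d.contains char = false then d.insert char 1 else d.modify char 0 (· + 1)) d).getD x 0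
      = d.getD x 0 + (l.count x : Int) := by
  induction l with
  | nil => simp
  | cons c l ih =>
    intro d x
    simp only [List.foldl_cons, ih, List.count_cons]
    rw [pvStepA_L]
    by_cases hx : x = c
    · simp [hx]; ring
    · simp [hx, Ne.symm hx]

-- loop invariant for A's third loop: with hashLeft reading off the counts of the processed
-- prefix p and hashRight the counts of the remaining part r, the loop adds, for every
-- distinct character of r with prefix count a and total count m, the occurrences a+1..m
-- of min(j, m - j), i.e. pvG m m - pvG a m
theorem pvLoop_eq (r : List Char) : ∀ (p : List Char) (L R : PySem.Dict Char Int) (acc : Int),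
    (∀ x, L.getD x 0 = (p.count x : Int)) →
    (∀ x, R.getD x 0 = (r.count x : Int)) →
    (r.foldl pvStepA (L, R, acc)).2.2
      = acc + ∑ c ∈ r.toFinset,
          (pvG ((p ++ r).count c) ((p ++ r).count c) - pvG (p.count c) ((p ++ r).count c)) := by
  induction r with
  | nil => intro p L R acc hL hR; simp
  | cons c r ih =>
    intro p L R acc hL hR
    have hR1 : ∀ x, (R.modify c 0 (· - 1)).getD x 0 = ((c :: r).count x : Int) - (if x = c then 1 else 0) := by
      intro x
      rw [PySem.Dict.getD_modify]
      by_cases hx : x = c <;> simp [hx, hR]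
    have hR1c : (R.modify c 0 (· - 1)).getD c 0 = (r.count c : Int) := by
      rw [hR1]; simp [List.count_cons]
    have hnoclamp : ¬ ((R.modify c 0 (· - 1)).getD c 0 < 0) := by
      rw [hR1c]; omega
    have hR' : ∀ x, (R.modify c 0 (· - 1)).getD x 0 = (r.count x : Int) := by
      intro x
      rw [hR1]
      by_cases hx : x = c
      · simp [hx, List.count_cons]
      · simp [hx, Ne.symm hx]
    rw [List.foldl_cons]
    simp only [pvStepA]
    rw [if_neg hnoclamp, hR1c]
    set L' := if L.contains c = false then L.insert c 1 else L.modify c 0 (· + 1) with hL'def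
    have hL' : ∀ x, L'.getD x 0 = ((p ++ [c]).count x : Int) := by
      intro x
      rw [hL'def, pvStepA_L, List.count_append]
      by_cases hx : x = c
      · simp [hx, hL]
      · simp [hx, Ne.symm hx, hL]
    rw [ih (p ++ [c]) L' (R.modify c 0 (· - 1)) _ hL' hR']
    rw [hL' c]
    have hq : (p ++ [c]) ++ r = p ++ c :: r := by simp
    rw [hq]
    have hcnt_pc : List.count c (p ++ [c]) = List.count c p + 1 := by simp [List.count_append]
    have hcnt_q : List.count c (p ++ c :: r) = List.count c p + 1 + List.count c r := by
      simp [List.count_append, List.count_cons]; ring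
    by_cases hc : c ∈ r
    · have hins : (c :: r).toFinset = r.toFinset := by
        simp [List.toFinset_cons, hc]
      rw [hins]
      have hcmem : c ∈ r.toFinset := List.mem_toFinset.mpr hc
      rw [← Finset.add_sum_erase _ _ hcmem, ← Finset.add_sum_erase _ _ hcmem]
      have hrest : ∑ x ∈ r.toFinset.erase c,
            (pvG (List.count x (p ++ c :: r)) (List.count x (p ++ c :: r)) - pvG (List.count x (p ++ [c])) (List.count x (p ++ c :: r)))
          = ∑ x ∈ r.toFinset.erase c,
            (pvG (List.count x (p ++ c :: r)) (List.count x (p ++ c :: r)) - pvG (List.count x p) (List.count x (p ++ c :: r))) := by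
        apply Finset.sum_congr rfl
        intro x hx
        have hxc : x ≠ c := (Finset.mem_erase.mp hx).1
        simp [List.count_append, Ne.symm hxc]
      rw [hrest, hcnt_pc]
      have hGs : pvG (List.count c p + 1) (List.count c (p ++ c :: r))
          = pvG (List.count c p) (List.count c (p ++ c :: r))
            + min ((List.count c p : Int) + 1) ((List.count c (p ++ c :: r) : Int) - ((List.count c p : Int) + 1)) := by
        simp [pvG]
      have hmr : ((List.count c (p ++ c :: r) : Int) - ((List.count c p : Int) + 1)) = (List.count c r : Int) := by
        rw [hcnt_q]; push_cast; ring
      rw [hGs, hmr, min_comm ((List.count c r : Int)) _]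
      push_cast
      ring
    · have hrc0 : List.count c r = 0 := List.count_eq_zero.mpr hc
      have hnotmem : c ∉ r.toFinset := fun h => hc (List.mem_toFinset.mp h)
      rw [List.toFinset_cons, Finset.sum_insert hnotmem]
      have hrest : ∑ x ∈ r.toFinset,
            (pvG (List.count x (p ++ c :: r)) (List.count x (p ++ c :: r)) - pvG (List.count x (p ++ [c])) (List.count x (p ++ c :: r)))
          = ∑ x ∈ r.toFinset,
            (pvG (List.count x (p ++ c :: r)) (List.count x (p ++ c :: r)) - pvG (List.count x p) (List.count x (p ++ c :: r))) := by
        apply Finset.sum_congr rfl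
        intro x hx
        have hxc : x ≠ c := fun h => hnotmem (h ▸ hx)
        simp [List.count_append, Ne.symm hxc]
      have hm : List.count c (p ++ c :: r) = List.count c p + 1 := by
        rw [hcnt_q, hrc0]
      rw [hrest, hcnt_pc, hm, hrc0]
      have hGs : pvG (List.count c p + 1) (List.count c p + 1) = pvG (List.count c p) (List.count c p + 1) := by
        simp only [pvG]
        have h0 : ((List.count c p + 1 : Nat) : Int) - ((List.count c p : Int) + 1) = 0 := by
          push_cast; ring
        rw [h0, min_eq_right (by positivity)]
        ring
      rw [hGs]
      have hM : min (((0 : Nat) : Int)) ((List.count c p + 1 : Nat) : Int) = 0 := by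
        rw [min_eq_left (by positivity)]; simp
      rw [hM]
      ring

-- m*m % 4 is the parity of m
theorem pvSqMod (m : Nat) : ((m : Int) * m) % 4 = ((m % 2 : Nat) : Int) := by
  rcases Nat.even_or_odd m with ⟨k, hk⟩ | ⟨k, hk⟩
  · subst hk
    have h : ((k + k : Nat) : Int) * ((k + k : Nat) : Int) = 4 * ((k:Int)*k) := by push_cast; ring
    rw [h]; omega
  · subst hk
    have h : ((2*k + 1 : Nat) : Int) * ((2*k + 1 : Nat) : Int) = 4 * ((k:Int)*k + k) + 1 := by push_cast; ring
    rw [h]; omega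

-- closed form for the partial sums pvG
theorem pvG_closed (m : Nat) : ∀ a : Nat, a ≤ m →
    4 * pvG a m = if 2 * a ≤ m then 2 * (a : Int) * ((a : Int) + 1)
      else (m : Int) * m - ((m % 2 : Nat) : Int) - 2 * ((m : Int) - a) * ((m : Int) - a - 1) := by
  intro a
  induction a with
  | zero => intro _; simp [pvG]
  | succ a ih =>
    intro ha
    have ih' := ih (by omega)
    simp only [pvG]
    by_cases h1 : 2 * (a + 1) ≤ m
    · have h2 : 2 * a ≤ m := by omega
      rw [if_pos h1]
      rw [if_pos h2] at ih'
      rw [mul_add, ih']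
      have hmin : min ((a : Int) + 1) ((m : Int) - ((a : Int) + 1)) = (a : Int) + 1 := by
        apply min_eq_left; push_cast at *; omega
      rw [hmin]
      push_cast
      ring
    · rw [if_neg h1]
      have hmin : min ((a : Int) + 1) ((m : Int) - ((a : Int) + 1)) = (m : Int) - ((a : Int) + 1) := by
        apply min_eq_right; push_cast at *; omega
      rw [mul_add, hmin, ih']
      by_cases h2 : 2 * a ≤ m
      · rw [if_pos h2]
        have : m = 2 * a ∨ m = 2 * a + 1 := by omega
        rcases this with hm | hm
        · subst hm
          have hp : ((2 * a % 2 : Nat) : Int) = 0 := by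
            have : 2 * a % 2 = 0 := by omega
            rw [this]; simp
          rw [hp]
          push_cast
          ring
        · subst hm
          have hp : (((2 * a + 1) % 2 : Nat) : Int) = 1 := by
            have : (2 * a + 1) % 2 = 1 := by omega
            rw [this]; simp
          rw [hp]
          push_cast
          ring
      · rw [if_neg h2]
        push_cast
        ring

-- the full per-character contribution is m*m // 4
theorem pvG_sq (m : Nat) : pvG m m = PySem.Int.floordiv ((m : Int) * m) 4 := by
  rcases Nat.eq_zero_or_pos m with hm | hm
  · subst hm
    have h0 : PySem.Int.floordiv ((0:Int) * 0) 4 = 0 := by decide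
    simp only [Nat.cast_zero] at *
    rw [h0]
    rfl
  · have h := pvG_closed m m le_rfl
    rw [if_neg (by omega)] at h
    have h4 : 4 * pvG m m = (m : Int) * m - ((m % 2 : Nat) : Int) := by
      rw [h]; ring
    rw [PySem.Int.floordiv_eq_ediv_of_pos (by norm_num)]
    have hmod := pvSqMod m
    have hb : ((m % 2 : Nat) : Int) = 0 ∨ ((m % 2 : Nat) : Int) = 1 := by
      have : m % 2 = 0 ∨ m % 2 = 1 := by omega
      rcases this with h | h <;> rw [h] <;> simp
    omega

-- ===== VERDICT (by name: the statement is the Claim_ definition above) =====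
theorem commonality_spec : Claim_equal_commonality := by
  intro s _hdom
  unfold Spec_commonality
  have hA : commonality s = (s.toList.foldl pvStepA
      (PySem.Dict.empty,
       s.toList.foldl (fun d char => if d.contains char = false then d.insert char 1 else d.modify char 0 (· + 1)) PySem.Dict.empty,
       0)).2.2 := rfl
  rw [hA, pvLoop_eq s.toList [] _ _ 0 (by intro x; simp) (by intro x; rw [pvCountFold]; simp)]
  have hB : commonality_alt s = ((PySem.Dict.counter s.toList).values.foldl
      (fun acc m => acc + PySem.Int.floordiv (m * m) 4) 0) := by
    simp only [commonality_alt, PySem.Dict.foldl_insert_getD_add_one_eq_counter]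
  rw [hB, PySem.List.foldl_add]
  simp only [PySem.Dict.values, PySem.Dict.items_counter, List.map_map]
  rw [← List.sum_toFinset _ (PySem.Set.nodup_ofList s.toList)]
  have hfs : (PySem.Set.ofList s.toList).toFinset = s.toList.toFinset := by
    apply Finset.ext
    intro x
    simp [List.mem_toFinset, PySem.Set.mem_ofList]
  rw [hfs]
  simp only [zero_add]
  apply Finset.sum_congr rfl
  intro c _
  simp only [List.nil_append, List.count_nil, Function.comp]
  have h0 : pvG 0 (List.count c s.toList) = 0 := rfl
  rw [h0, sub_zero, pvG_sq]
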